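-- pv_equiv track=rewrite | github.com/patchydev/adventOfCode | 2024/Day 2/d2p2.py | is_safe_line
-- ===== SOURCE A (Python) =====
-- def is_safe_line(values):
--     previous = values[0]
--     up = False
--     down = False
--
--     for val in values[1:]:
--         diff = abs(val - previous)
--
--         if not up and not down:
--             if val > previous:
--                 up = True
--             elif val < previous:
--                 down = True
--
--         if not (0 < diff < 4) or (up and val < previous) or (down and val > previous):
--             return False
--
--         previous = val
--
--     return True
-- ===== SOURCE B (Python) =====
-- def is_safe_line(values):
--     first = values[0]  # raises IndexError on empty input, like the original
--     diffs = [b - a for a, b in zip(values, values[1:])]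
--     return all(1 <= d <= 3 for d in diffs) or all(-3 <= d <= -1 for d in diffs)
-- ===== Notes on version B (the rewrite author's own statement) =====
-- stated objective: simpler
-- what changed: Replaced the direction-locking state machine (up/down flags, early return) with a precomputed consecutive-difference list judged by two global predicates: all differences between 1 and 3, or all between -3 and -1.
import Mathlib
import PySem

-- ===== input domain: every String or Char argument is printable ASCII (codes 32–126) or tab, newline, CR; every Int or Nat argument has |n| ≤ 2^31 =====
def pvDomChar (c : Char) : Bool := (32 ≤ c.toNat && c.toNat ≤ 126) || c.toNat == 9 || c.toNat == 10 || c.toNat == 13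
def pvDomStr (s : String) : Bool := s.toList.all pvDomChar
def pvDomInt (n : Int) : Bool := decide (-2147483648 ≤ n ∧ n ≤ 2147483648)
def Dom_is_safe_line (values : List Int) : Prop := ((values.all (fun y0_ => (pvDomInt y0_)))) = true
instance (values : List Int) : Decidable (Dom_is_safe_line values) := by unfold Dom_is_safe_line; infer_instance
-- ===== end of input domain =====

-- B replaces A's direction-locking state machine with two global predicates over
-- the precomputed consecutive-difference list (simpler decomposition, same cost).


-- ===== PORT A =====
-- loop over values[1:] carrying (previous, up, down); early `return False` = returning false
def isSafeGo (previous : Int) (up down : Bool) : List Int → Bool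
  | [] => true
  | val :: rest =>
    let diff : Int := |val - previous|
    let up' := if !up && !down then (if val > previous then true else up) else up
    let down' := if !up && !down then (if val > previous then down else (if val < previous then true else down)) else down
    if !(0 < diff ∧ diff < 4) || (up' && val < previous) || (down' && val > previous) then
      false
    else
      isSafeGo val up' down' rest

def is_safe_line (values : List Int) : Bool :=
  match values with
  | [] => false   -- values[0] raises IndexError in Python: excluded by Pre_
  | previous :: rest => isSafeGo previous false false rest

-- ===== PORT B =====
def is_safe_line_alt (values : List Int) : Bool :=
  match values with
  | [] => false   -- values[0] raises IndexError in Python: excluded by Pre_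
  | _ :: _ =>
    let diffs := (values.zip (values.drop 1)).map (fun p => p.2 - p.1)
    diffs.all (fun d => 1 ≤ d && d ≤ 3) || diffs.all (fun d => -3 ≤ d && d ≤ -1)

-- ===== PRECONDITION & SPEC =====
-- Pre_ excludes only the empty list, on which A raises IndexError (values[0]).
def Pre_is_safe_line (values : List Int) : Prop := values ≠ []
instance (values : List Int) : Decidable (Pre_is_safe_line values) := by unfold Pre_is_safe_line; infer_instance
def pvWitness_is_safe_line : List Int := [1, 2, 4]

def Spec_is_safe_line (values : List Int) (out : Bool) : Prop := out = is_safe_line_alt values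
instance (values : List Int) (out : Bool) : Decidable (Spec_is_safe_line values out) := by unfold Spec_is_safe_line; infer_instance

-- ===== CLAIM (what is proved, stated in full; the proofs are below) =====
def Claim_equal_is_safe_line : Prop := ∀ (values : List Int), Dom_is_safe_line values → Pre_is_safe_line values → Spec_is_safe_line values (is_safe_line values)

-- ===== LEMMAS AND PROOFS =====

-- "all consecutive steps from p through rest satisfy P of the difference"
def chain (P : Int → Bool) (p : Int) : List Int → Bool
  | [] => true
  | v :: rest => P (v - p) && chain P v rest

def upP (d : Int) : Bool := 1 ≤ d && d ≤ 3
def downP (d : Int) : Bool := -3 ≤ d && d ≤ -1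

lemma isSafeGo_up (rest : List Int) : ∀ p, isSafeGo p true false rest = chain upP p rest := by
  induction rest with
  | nil => intro p; rfl
  | cons v rest ih =>
    intro p
    simp only [isSafeGo, chain]
    by_cases h : upP (v - p) = true
    · have h1 : 1 ≤ v - p ∧ v - p ≤ 3 := by simpa [upP] using h
      have hab : |v - p| = v - p := abs_of_pos (by omega)
      simp [h, ih, hab, show ¬ v - p = 0 by omega, show ¬ 4 ≤ v - p by omega,
            show v - p < 4 by omega, show ¬ v < p by omega, show p < v by omega]
    · have h' : upP (v - p) = false := by simpa using h
      rw [h']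
      have h1 : v - p = 0 ∨ 4 ≤ |v - p| ∨ v < p := by
        rcases abs_cases (v - p) with ⟨e, _⟩ | ⟨e, _⟩ <;> simp [upP] at h' <;> omega
      rcases h1 with e | e | e <;> simp [e]

lemma isSafeGo_down (rest : List Int) : ∀ p, isSafeGo p false true rest = chain downP p rest := by
  induction rest with
  | nil => intro p; rfl
  | cons v rest ih =>
    intro p
    simp only [isSafeGo, chain]
    by_cases h : downP (v - p) = true
    · have h1 : -3 ≤ v - p ∧ v - p ≤ -1 := by simpa [downP] using h
      have hab : |v - p| = p - v := by rw [abs_sub_comm]; exact abs_of_pos (by omega)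
      simp [h, ih, hab, show ¬ v - p = 0 by omega, show ¬ 4 ≤ p - v by omega,
            show p - v < 4 by omega, show ¬ p < v by omega, show v < p by omega]
    · have h' : downP (v - p) = false := by simpa using h
      rw [h']
      have h1 : v - p = 0 ∨ 4 ≤ |v - p| ∨ p < v := by
        rcases abs_cases (v - p) with ⟨e, _⟩ | ⟨e, _⟩ <;> simp [downP] at h' <;> omega
      rcases h1 with e | e | e <;> simp [e]

lemma isSafeGo_free (rest : List Int) (p : Int) :
    isSafeGo p false false rest = (chain upP p rest || chain downP p rest) := by
  cases rest with
  | nil => rfl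
  | cons v rest =>
    simp only [isSafeGo, chain]
    rcases lt_trichotomy v p with hlt | heq | hgt
    · -- first step goes down: direction locks to down, the up-chain is dead
      have hup : upP (v - p) = false := by simp [upP]; omega
      rw [hup]
      by_cases h : downP (v - p) = true
      · have h1 : -3 ≤ v - p ∧ v - p ≤ -1 := by simpa [downP] using h
        have hab : |v - p| = p - v := by rw [abs_sub_comm]; exact abs_of_pos (by omega)
        simp [h, hab, hlt, isSafeGo_down, show ¬ v - p = 0 by omega,
              show ¬ 4 ≤ p - v by omega, show p - v < 4 by omega, show ¬ p < v by omega, show v < p by omega]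
      · have h' : downP (v - p) = false := by simpa using h
        rw [h']
        have h1 : v - p = 0 ∨ 4 ≤ |v - p| := by
          rcases abs_cases (v - p) with ⟨e, _⟩ | ⟨e, _⟩ <;> simp [downP] at h' <;> omega
        rcases h1 with e | e <;> simp [e, hlt]
    · subst heq
      simp [upP, downP]
    · -- first step goes up: direction locks to up, the down-chain is dead
      have hdn : downP (v - p) = false := by simp [downP]; omega
      rw [hdn]
      by_cases h : upP (v - p) = true
      · have h1 : 1 ≤ v - p ∧ v - p ≤ 3 := by simpa [upP] using h
        have hab : |v - p| = v - p := abs_of_pos (by omega)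
        simp [h, hab, hgt, isSafeGo_up, show ¬ v - p = 0 by omega,
              show ¬ 4 ≤ v - p by omega, show v - p < 4 by omega, show ¬ v < p by omega, show p < v by omega]
      · have h' : upP (v - p) = false := by simpa using h
        rw [h']
        have h1 : v - p = 0 ∨ 4 ≤ |v - p| := by
          rcases abs_cases (v - p) with ⟨e, _⟩ | ⟨e, _⟩ <;> simp [upP] at h' <;> omega
        rcases h1 with e | e <;> simp [e, hgt]

lemma diffs_all_chain (P : Int → Bool) (rest : List Int) : ∀ p,
    (((p :: rest).zip rest).map (fun q => q.2 - q.1)).all P = chain P p rest := by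
  induction rest with
  | nil => intro p; rfl
  | cons v rest ih =>
    intro p
    simp only [List.zip_cons_cons, List.map_cons, List.all_cons, chain, ih]

-- ===== VERDICT (by name: the statement is the Claim_ definition above) =====
theorem is_safe_line_spec : Claim_equal_is_safe_line := by
  intro values _ hpre
  unfold Spec_is_safe_line
  cases values with
  | nil => exact absurd rfl hpre
  | cons p rest =>
    show isSafeGo p false false rest = _
    simp only [is_safe_line_alt, List.drop_succ_cons, List.drop_zero]
    rw [isSafeGo_free, diffs_all_chain, diffs_all_chain]
    rfl
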